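-- pv_equiv track=rewrite | github.com/arushigupta596/Renew_OCR | parsers/llm_parser.py | _deduplicate_per_vehicle_rows
-- ===== SOURCE A (Python) =====
-- def _deduplicate_per_vehicle_rows(merged: dict, column_headers: list[str]) -> dict:
--     """Merge duplicate-looking per_vehicle_rows instead of dropping later partial rows.
--
--     Key priority:
--       1. BoE number, for Case 1 rows.
--       2. (vehicle_no, invoice_no) composite.
--       3. vehicle_no alone.
--       4. Full-row content hash fallback.
--     """
--     per_vehicle = merged.get("per_vehicle_rows", [])
--     if not per_vehicle:
--         return merged
--
--     def _is_blank(value) -> bool: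
--         return str(value).strip().upper() in ("", "NONE", "N/A", "NULL")
--
--     def _find_vehicle_value(row: dict) -> str | None:
--         # Check for explicit vehicle key first
--         for key, val in row.items():
--             if "vehicle" in str(key).lower():
--                 v = str(val).strip()
--                 if not _is_blank(v):
--                     return v
--         return None
--
--     def _find_boe_value(row: dict) -> str | None:
--         for key, val in row.items():
--             key_lower = str(key).lower()
--             if "boe" in key_lower or "bill of entry" in key_lower or "be number" in key_lower:
--                 v = str(val).strip()
--                 if not _is_blank(v):
--                     return v
--         return None
--
--     def _find_invoice_value(row: dict) -> str | None:
--         for key, val in row.items():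
--             key_lower = str(key).lower()
--             if "invoice" in key_lower and any(t in key_lower for t in ("no", "num", "number")):
--                 v = str(val).strip()
--                 if not _is_blank(v):
--                     return v
--         for key, val in row.items():
--             if "invoice" in str(key).lower():
--                 v = str(val).strip()
--                 if not _is_blank(v):
--                     return v
--         return None
--
--     def _row_hash(row: dict) -> str:
--         parts = [f"{k}={str(row[k]).strip().upper()}" for k in sorted(row.keys())
--                  if not _is_blank(row[k])]
--         return "|".join(parts)
--
--     def _merge_rows(base: dict, incoming: dict) -> dict:
--         merged_row = dict(base)
--         for key, value in incoming.items():
--             if key.startswith("_") or _is_blank(value):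
--                 continue
--             if key not in merged_row or _is_blank(merged_row[key]):
--                 merged_row[key] = value
--         return merged_row
--
--     keyed_rows: dict[str, dict] = {}
--     hash_keys: set[str] = set()
--     unique_rows: list[dict] = []
--
--     for row in per_vehicle:
--         boe = _find_boe_value(row)
--         vehicle = _find_vehicle_value(row)
--         invoice = _find_invoice_value(row)
--
--         key = None
--         if boe:
--             key = f"boe::{boe.strip().upper()}"
--         elif vehicle and invoice:
--             key = f"vehicle_invoice::{vehicle.strip().upper()}||{invoice.strip().upper()}"
--         elif vehicle:
--             key = f"vehicle::{vehicle.strip().upper()}"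
--
--         if key:
--             if key in keyed_rows:
--                 keyed_rows[key] = _merge_rows(keyed_rows[key], row)
--             else:
--                 keyed_rows[key] = dict(row)
--             continue
--
--         h = _row_hash(row)
--         if h in hash_keys:
--             continue
--         hash_keys.add(h)
--         unique_rows.append(dict(row))
--
--     unique_rows.extend(keyed_rows.values())
--
--     merged["per_vehicle_rows"] = unique_rows
--     return merged
-- ===== SOURCE B (Python) =====
-- def _deduplicate_per_vehicle_rows(merged: dict, column_headers: list[str]) -> dict:
--     """Tag/group/combine rewrite: each row gets a tag (priority key or content
--     hash); tags are deduplicated preserving first appearance; every hash tag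
--     emits its first row, every key tag emits a columnwise combination of its
--     group (per column: the first usable value), with no incremental merging."""
--     per_vehicle = merged.get("per_vehicle_rows", [])
--     if not per_vehicle:
--         return merged
--
--     def _is_blank(value) -> bool:
--         return str(value).strip().upper() in ("", "NONE", "N/A", "NULL")
--
--     def _find_vehicle_value(row):
--         for key, val in row.items():
--             if "vehicle" in str(key).lower():
--                 v = str(val).strip()
--                 if not _is_blank(v):
--                     return v
--         return None
--
--     def _find_boe_value(row):
--         for key, val in row.items():
--             key_lower = str(key).lower()
--             if "boe" in key_lower or "bill of entry" in key_lower or "be number" in key_lower: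
--                 v = str(val).strip()
--                 if not _is_blank(v):
--                     return v
--         return None
--
--     def _find_invoice_value(row):
--         for key, val in row.items():
--             key_lower = str(key).lower()
--             if "invoice" in key_lower and any(t in key_lower for t in ("no", "num", "number")):
--                 v = str(val).strip()
--                 if not _is_blank(v):
--                     return v
--         for key, val in row.items():
--             if "invoice" in str(key).lower():
--                 v = str(val).strip()
--                 if not _is_blank(v):
--                     return v
--         return None
--
--     def _row_key(row):
--         boe = _find_boe_value(row)
--         if boe:
--             return f"boe::{boe.strip().upper()}"
--         vehicle = _find_vehicle_value(row)
--         invoice = _find_invoice_value(row)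
--         if vehicle and invoice:
--             return f"vehicle_invoice::{vehicle.strip().upper()}||{invoice.strip().upper()}"
--         if vehicle:
--             return f"vehicle::{vehicle.strip().upper()}"
--         return None
--
--     def _row_hash(row) -> str:
--         parts = [f"{k}={str(row[k]).strip().upper()}" for k in sorted(row.keys())
--                  if not _is_blank(row[k])]
--         return "|".join(parts)
--
--     def _tag(row):
--         k = _row_key(row)
--         if k is not None:
--             return ("key", k)
--         return ("hash", _row_hash(row))
--
--     def _combine(grp):
--         rest = grp[1:]
--
--         def _resolve(k):
--             for r in rest:
--                 for k2, v2 in r.items():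
--                     if k2 == k and not _is_blank(v2):
--                         return v2
--             return None
--
--         row = {}
--         for k, v in grp[0].items():
--             lv = _resolve(k) if _is_blank(v) and not k.startswith("_") else None
--             row[k] = v if lv is None else lv
--         for r in rest:
--             for k, v in r.items():
--                 if k not in row and not k.startswith("_") and not _is_blank(v):
--                     row[k] = v
--         return row
--
--     tags = [_tag(r) for r in per_vehicle]
--     order = []
--     for t in tags:
--         if t not in order:
--             order.append(t)
--     out = []
--     for t in order:
--         if t[0] == "hash":
--             grp = [r for r, u in zip(per_vehicle, tags) if u == t]
--             out.append(dict(grp[0]))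
--     for t in order:
--         if t[0] == "key":
--             grp = [r for r, u in zip(per_vehicle, tags) if u == t]
--             out.append(_combine(grp))
--     merged["per_vehicle_rows"] = out
--     return merged
-- ===== Notes on version B (the rewrite author's own statement) =====
-- stated objective: alternative
-- what changed: Replaces A's online single pass (a dict of incrementally _merge_rows-merged rows plus a seen-hash set and output list updated per row) with a staged pipeline: compute a tag per row, deduplicate the tag list preserving first appearance, group rows by tag, then emit each hash group's first row and each key group's row combined COLUMNWISE (per column the first usable value, new columns in first-usable-appearance order) with no row-merge function at all.
import Mathlib
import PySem

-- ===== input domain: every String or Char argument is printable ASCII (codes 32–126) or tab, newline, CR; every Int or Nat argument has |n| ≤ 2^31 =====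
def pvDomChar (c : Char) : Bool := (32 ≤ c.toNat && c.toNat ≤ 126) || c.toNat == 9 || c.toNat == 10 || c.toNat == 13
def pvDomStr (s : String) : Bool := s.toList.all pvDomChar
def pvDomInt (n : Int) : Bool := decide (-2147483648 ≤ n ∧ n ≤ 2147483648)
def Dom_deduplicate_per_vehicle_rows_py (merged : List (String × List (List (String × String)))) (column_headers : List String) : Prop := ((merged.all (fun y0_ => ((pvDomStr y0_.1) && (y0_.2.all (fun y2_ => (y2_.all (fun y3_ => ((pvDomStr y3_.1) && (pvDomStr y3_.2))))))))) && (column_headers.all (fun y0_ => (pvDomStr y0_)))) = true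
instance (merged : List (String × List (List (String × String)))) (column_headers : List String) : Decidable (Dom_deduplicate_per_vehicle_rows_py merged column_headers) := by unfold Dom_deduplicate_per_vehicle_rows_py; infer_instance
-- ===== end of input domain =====

-- B replaces A's online accumulation (dict of already-merged rows + seen-hash set) by a staged
-- tag/dedup/group pipeline whose keyed rows are combined COLUMNWISE (first usable value per column)
-- instead of by repeated row merging; equivalence is about the RETURN value (the Python A mutates
-- `merged` in place; B performs the same mutation).

-- ===== PORT A =====
-- _is_blank
def pvIsBlank (v : String) : Bool :=
  ["", "NONE", "N/A", "NULL"].contains (PySem.Str.upper (PySem.Str.strip v))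

-- _find_vehicle_value (early-return loop over row.items())
def pvFindVehicle : List (String × String) → Option String
  | [] => none
  | (k, v) :: rest =>
    if PySem.Str.isIn "vehicle" (PySem.Str.lower k) then
      let s := PySem.Str.strip v
      if !pvIsBlank s then some s else pvFindVehicle rest
    else pvFindVehicle rest

-- _find_boe_value
def pvFindBoe : List (String × String) → Option String
  | [] => none
  | (k, v) :: rest =>
    let kl := PySem.Str.lower k
    if PySem.Str.isIn "boe" kl || PySem.Str.isIn "bill of entry" kl || PySem.Str.isIn "be number" kl then
      let s := PySem.Str.strip v
      if !pvIsBlank s then some s else pvFindBoe rest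
    else pvFindBoe rest

-- _find_invoice_value, first loop
def pvFindInvoice1 : List (String × String) → Option String
  | [] => none
  | (k, v) :: rest =>
    let kl := PySem.Str.lower k
    if PySem.Str.isIn "invoice" kl && (["no", "num", "number"].any (fun t => PySem.Str.isIn t kl)) then
      let s := PySem.Str.strip v
      if !pvIsBlank s then some s else pvFindInvoice1 rest
    else pvFindInvoice1 rest

-- _find_invoice_value, second loop
def pvFindInvoice2 : List (String × String) → Option String
  | [] => none
  | (k, v) :: rest =>
    if PySem.Str.isIn "invoice" (PySem.Str.lower k) then
      let s := PySem.Str.strip v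
      if !pvIsBlank s then some s else pvFindInvoice2 rest
    else pvFindInvoice2 rest

def pvFindInvoice (row : List (String × String)) : Option String :=
  match pvFindInvoice1 row with
  | some v => some v
  | none => pvFindInvoice2 row

-- Python truthiness of an Optional[str]
def pvTruthy : Option String → Bool
  | none => false
  | some s => s ≠ ""

-- _row_hash : "|".join(f"{k}={str(row[k]).strip().upper()}" for k in sorted(row.keys()) if not _is_blank(row[k]))
def pvRowHash (row : List (String × String)) : String :=
  let d := PySem.Dict.mk row
  PySem.Str.join "|"
    ((PySem.List.sorted d.keys (fun k => k) false).filterMap (fun k =>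
      if pvIsBlank (d.getD k "") then none
      else some (k ++ "=" ++ PySem.Str.upper (PySem.Str.strip (d.getD k "")))))

-- body of _merge_rows's loop, one (key, value) pair of `incoming`
def pvMergeCell (d : PySem.Dict String String) (c : String × String) : PySem.Dict String String :=
  if PySem.Str.startswith c.1 "_" || pvIsBlank c.2 then d
  else if !(d.contains c.1) || pvIsBlank (d.getD c.1 "") then d.insert c.1 c.2
  else d

-- _merge_rows
def pvMergeRows (base incoming : List (String × String)) : List (String × String) :=
  (incoming.foldl pvMergeCell (PySem.Dict.mk base)).items

-- loop body of A: per-row key computation (boe / vehicle / invoice up front, then the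
-- if/elif chain), then either merge into keyed_rows or dedup by content hash
def dedupStepA (st : PySem.Dict String (List (String × String)) × PySem.Set String × List (List (String × String)))
    (row : List (String × String)) :
    PySem.Dict String (List (String × String)) × PySem.Set String × List (List (String × String)) :=
  let keyed := st.1
  let hashes := st.2.1
  let uniq := st.2.2
  let boe := pvFindBoe row
  let vehicle := pvFindVehicle row
  let invoice := pvFindInvoice row
  let key : Option String :=
    if pvTruthy boe then
      some ("boe::" ++ PySem.Str.upper (PySem.Str.strip (boe.getD "")))
    else if pvTruthy vehicle && pvTruthy invoice then
      some ("vehicle_invoice::" ++ PySem.Str.upper (PySem.Str.strip (vehicle.getD "")) ++ "||" ++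
        PySem.Str.upper (PySem.Str.strip (invoice.getD "")))
    else if pvTruthy vehicle then
      some ("vehicle::" ++ PySem.Str.upper (PySem.Str.strip (vehicle.getD "")))
    else none
  if pvTruthy key then
    let k := key.getD ""
    if keyed.contains k then
      (keyed.insert k (pvMergeRows (keyed.getD k []) row), hashes, uniq)
    else
      (keyed.insert k row, hashes, uniq)
  else
    let h := pvRowHash row
    if hashes.contains h then (keyed, hashes, uniq)
    else (keyed, hashes.add h, uniq ++ [row])

def deduplicate_per_vehicle_rows_py (merged : List (String × List (List (String × String)))) (column_headers : List String) : List (String × List (List (String × String))) :=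
  let per_vehicle := (PySem.Dict.mk merged).getD "per_vehicle_rows" []
  if per_vehicle = [] then merged
  else
    let st := per_vehicle.foldl dedupStepA (PySem.Dict.empty, PySem.Set.empty, [])
    let unique_rows := st.2.2 ++ st.1.values
    ((PySem.Dict.mk merged).insert "per_vehicle_rows" unique_rows).items

-- ===== PORT B =====
-- _row_key: boe first (early return), then vehicle/invoice
def pvRowKey (row : List (String × String)) : Option String :=
  let boe := pvFindBoe row
  if pvTruthy boe then
    some ("boe::" ++ PySem.Str.upper (PySem.Str.strip (boe.getD "")))
  else
    let vehicle := pvFindVehicle row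
    let invoice := pvFindInvoice row
    if pvTruthy vehicle && pvTruthy invoice then
      some ("vehicle_invoice::" ++ PySem.Str.upper (PySem.Str.strip (vehicle.getD "")) ++ "||" ++
        PySem.Str.upper (PySem.Str.strip (invoice.getD "")))
    else if pvTruthy vehicle then
      some ("vehicle::" ++ PySem.Str.upper (PySem.Str.strip (vehicle.getD "")))
    else none

-- _tag
def pvTag (row : List (String × String)) : String × String :=
  match pvRowKey row with
  | some k => ("key", k)
  | none => ("hash", pvRowHash row)

-- inner loop of _resolve over one row's items
def pvResolveCells (k : String) : List (String × String) → Option String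
  | [] => none
  | c :: cs => if c.1 == k && !pvIsBlank c.2 then some c.2 else pvResolveCells k cs

-- _resolve: first usable value for column k among the later rows
def pvResolveRows (k : String) : List (List (String × String)) → Option String
  | [] => none
  | r :: rs =>
    match pvResolveCells k r with
    | some v => some v
    | none => pvResolveRows k rs

-- `row[k] = v if lv is None else lv` with `lv = _resolve(k) if _is_blank(v) and not k.startswith("_") else None`
def pvCombineVal (rest : List (List (String × String))) (c : String × String) : String :=
  if pvIsBlank c.2 && !PySem.Str.startswith c.1 "_" then (pvResolveRows c.1 rest).getD c.2 else c.2

-- body of _combine's second loop: add a later row's cell as a new column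
def pvNewCell (d : PySem.Dict String String) (c : String × String) : PySem.Dict String String :=
  if !(d.contains c.1) && !PySem.Str.startswith c.1 "_" && !pvIsBlank c.2 then d.insert c.1 c.2 else d

-- _combine
def pvCombine (grp : List (List (String × String))) : List (String × String) :=
  let rest := grp.drop 1
  let d0 := (grp.headD []).foldl (fun d c => d.insert c.1 (pvCombineVal rest c)) PySem.Dict.empty
  (rest.foldl (fun d r => r.foldl pvNewCell d) d0).items

-- `[r for r, u in zip(per_vehicle, tags) if u == t]`
def pvGroup (per_vehicle : List (List (String × String))) (tags : List (String × String)) (t : String × String) : List (List (String × String)) :=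
  (per_vehicle.zip tags).filterMap (fun p => if p.2 == t then some p.1 else none)

def deduplicate_per_vehicle_rows_py_alt (merged : List (String × List (List (String × String)))) (column_headers : List String) : List (String × List (List (String × String))) :=
  let per_vehicle := (PySem.Dict.mk merged).getD "per_vehicle_rows" []
  if per_vehicle = [] then merged
  else
    let tags := per_vehicle.map pvTag
    let order := PySem.List.dedup tags          -- order = list(dict.fromkeys(tags))
    -- grp[0] is ported as .headD []: a group of a tag from `order` is nonempty
    let out1 := order.foldl (fun out t => if t.1 == "hash" then out ++ [(pvGroup per_vehicle tags t).headD []] else out) []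
    let out2 := order.foldl (fun out t => if t.1 == "key" then out ++ [pvCombine (pvGroup per_vehicle tags t)] else out) out1
    ((PySem.Dict.mk merged).insert "per_vehicle_rows" out2).items

-- ===== PRECONDITION & SPEC =====
-- Pre_ excludes association lists in which some row carries a duplicate key: such lists do not
-- encode any Python dict (rows are dicts in Python), so A's behaviour there is an artefact of the
-- encoding, not of the program.
def Pre_deduplicate_per_vehicle_rows_py (merged : List (String × List (List (String × String)))) (column_headers : List String) : Prop :=
  ∀ p ∈ merged, ∀ row ∈ p.2, (row.map Prod.fst).Nodup
instance (merged : List (String × List (List (String × String)))) (column_headers : List String) : Decidable (Pre_deduplicate_per_vehicle_rows_py merged column_headers) := by unfold Pre_deduplicate_per_vehicle_rows_py; infer_instance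

def pvWitness_deduplicate_per_vehicle_rows_py : (List (String × List (List (String × String)))) × List String :=
  ([("per_vehicle_rows", [[("vehicle no", " V1 "), ("amount", "7")], [("vehicle no", "V1"), ("desc", "x")], [("note", "y")]])], [])

def Spec_deduplicate_per_vehicle_rows_py (merged : List (String × List (List (String × String)))) (column_headers : List String) (out : List (String × List (List (String × String)))) : Prop := out = deduplicate_per_vehicle_rows_py_alt merged column_headers
instance (merged : List (String × List (List (String × String)))) (column_headers : List String) (out : List (String × List (List (String × String)))) : Decidable (Spec_deduplicate_per_vehicle_rows_py merged column_headers out) := by unfold Spec_deduplicate_per_vehicle_rows_py; infer_instance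

-- ===== CLAIM (what is proved, stated in full; the proofs are below) =====
def Claim_equal_deduplicate_per_vehicle_rows_py : Prop := ∀ (merged : List (String × List (List (String × String)))) (column_headers : List String), Dom_deduplicate_per_vehicle_rows_py merged column_headers → Pre_deduplicate_per_vehicle_rows_py merged column_headers → Spec_deduplicate_per_vehicle_rows_py merged column_headers (deduplicate_per_vehicle_rows_py merged column_headers)

-- ===== LEMMAS AND PROOFS =====

-- A's per-row state update, re-expressed through B's _row_key helper (definitionally equal)
theorem dedupStepA_eq (st : PySem.Dict String (List (String × String)) × PySem.Set String × List (List (String × String)))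
    (row : List (String × String)) :
    dedupStepA st row =
      if pvTruthy (pvRowKey row) then
        if st.1.contains ((pvRowKey row).getD "") then
          (st.1.insert ((pvRowKey row).getD "") (pvMergeRows (st.1.getD ((pvRowKey row).getD "") []) row), st.2.1, st.2.2)
        else (st.1.insert ((pvRowKey row).getD "") row, st.2.1, st.2.2)
      else
        if st.2.1.contains (pvRowHash row) then (st.1, st.2.1, st.2.2)
        else (st.1, st.2.1.add (pvRowHash row), st.2.2 ++ [row]) := rfl

-- the strings _row_key builds are never empty, so `if key:` is `if key is not None:`
theorem pvRowKey_truthy (row : List (String × String)) :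
    pvTruthy (pvRowKey row) = (pvRowKey row).isSome := by
  have hne : ∀ (p x : String), p.length ≠ 0 → pvTruthy (some (p ++ x)) = true := by
    intro p x hp
    simp only [pvTruthy, ne_eq, decide_eq_true_eq]
    intro h
    have := congrArg String.length h
    rw [String.length_append] at this
    rw [show ("" : String).length = 0 from rfl] at this
    omega
  unfold pvRowKey
  dsimp only
  split_ifs with h1 h2 h3
  · rw [hne _ _ (by decide)]; rfl
  · rw [hne _ _ (by
      rw [String.length_append, String.length_append,
        show ("vehicle_invoice::" : String).length = 17 from rfl]
      omega)]
    rfl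
  · rw [hne _ _ (by decide)]; rfl
  · rfl

-- pvTag shape facts
theorem pvTag_key_iff (row : List (String × String)) (k : String) :
    pvTag row = ("key", k) ↔ pvRowKey row = some k := by
  unfold pvTag
  cases pvRowKey row with
  | none => simp
  | some k' => simp

-- == SECTION 1: the columnwise _combine equals the left fold of _merge_rows ==

def specReduce (grp : List (List (String × String))) : List (String × String) :=
  (grp.drop 1).foldl pvMergeRows (grp.headD [])

-- cell-level values used by _combine's first loop, over the flattened later cells
def pvRvPair (cells : List (String × String)) (c : String × String) : String × String :=
  (c.1, if pvIsBlank c.2 && !PySem.Str.startswith c.1 "_" then (pvResolveCells c.1 cells).getD c.2 else c.2)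

theorem pvResolveRows_eq_flatten (k : String) (rows : List (List (String × String))) :
    pvResolveRows k rows = pvResolveCells k rows.flatten := by
  induction rows with
  | nil => rfl
  | cons r rs ih =>
    have happ : ∀ (l1 l2 : List (String × String)),
        pvResolveCells k (l1 ++ l2) =
          match pvResolveCells k l1 with
          | some v => some v
          | none => pvResolveCells k l2 := by
      intro l1 l2
      induction l1 with
      | nil => rfl
      | cons c cs ihc =>
        simp only [List.cons_append, pvResolveCells]
        split <;> simp [ihc]
    simp only [pvResolveRows, List.flatten_cons, happ, ih]

theorem nodup_keys_pvMergeCell (d : PySem.Dict String String) (c : String × String)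
    (h : d.keys.Nodup) : (pvMergeCell d c).keys.Nodup := by
  unfold pvMergeCell
  split_ifs with h1 h2
  · exact h
  · exact PySem.Dict.nodup_keys_insert _ _ _ h
  · exact h


-- dropping a first cell of the resolution list that cannot be used
theorem pvRvPair_cons_skip (c0 : String × String) (cs : List (String × String)) (c : String × String)
    (h : (pvIsBlank c.2 && !PySem.Str.startswith c.1 "_") = true → (c0.1 == c.1 && !pvIsBlank c0.2) = false) :
    pvRvPair (c0 :: cs) c = pvRvPair cs c := by
  unfold pvRvPair
  by_cases hcond : (pvIsBlank c.2 && !PySem.Str.startswith c.1 "_") = true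
  · simp only [hcond, if_pos, pvResolveCells, h hcond, Bool.false_eq_true, if_false]
  · simp only [hcond, Bool.false_eq_true, if_false]

-- the single-cell simulation step
theorem pvNewCell_star (c0 : String × String) (cs : List (String × String))
    (d : PySem.Dict String String) (hnd : d.keys.Nodup) :
    pvNewCell (PySem.Dict.mk (d.items.map (pvRvPair (c0 :: cs)))) c0 =
      PySem.Dict.mk ((pvMergeCell d c0).items.map (pvRvPair cs)) := by
  have hcont : (PySem.Dict.mk (d.items.map (pvRvPair (c0 :: cs)))).contains c0.1 = d.contains c0.1 := by
    simp only [PySem.Dict.contains, List.any_map]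
    have : ((fun p : String × String => p.1 == c0.1) ∘ pvRvPair (c0 :: cs)) = (fun p : String × String => p.1 == c0.1) := by
      funext p
      simp only [Function.comp_apply, pvRvPair]
    rw [this]
  by_cases hs : PySem.Str.startswith c0.1 "_" = true
  · -- incoming key starts with "_": both sides skip the cell
    have e1 : pvMergeCell d c0 = d := by
      unfold pvMergeCell; rw [if_pos (by rw [hs, Bool.true_or])]
    have e2 : pvNewCell (PySem.Dict.mk (d.items.map (pvRvPair (c0 :: cs)))) c0
        = PySem.Dict.mk (d.items.map (pvRvPair (c0 :: cs))) := by
      unfold pvNewCell; rw [if_neg (by rw [hs]; simp)]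
    rw [e1, e2]
    apply PySem.Dict.ext
    apply List.map_congr_left
    intro c _
    apply pvRvPair_cons_skip
    intro hc
    by_cases he : (c0.1 == c.1) = true
    · have hk : c.1 = c0.1 := (eq_of_beq he).symm
      rw [Bool.and_eq_true] at hc
      rw [hk, hs] at hc
      simp at hc
    · simp [he]
  · have hs' : PySem.Str.startswith c0.1 "_" = false := Bool.eq_false_iff.mpr hs
    by_cases hb : pvIsBlank c0.2 = true
    · -- incoming value blank: both sides skip the cell
      have e1 : pvMergeCell d c0 = d := by
        unfold pvMergeCell; rw [if_pos (by rw [hb, Bool.or_true])]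
      have e2 : pvNewCell (PySem.Dict.mk (d.items.map (pvRvPair (c0 :: cs)))) c0
          = PySem.Dict.mk (d.items.map (pvRvPair (c0 :: cs))) := by
        unfold pvNewCell; rw [if_neg (by rw [hb]; simp)]
      rw [e1, e2]
      apply PySem.Dict.ext
      apply List.map_congr_left
      intro c _
      apply pvRvPair_cons_skip
      intro _
      rw [hb]
      simp
    · -- usable cell
      have hb' : pvIsBlank c0.2 = false := Bool.eq_false_iff.mpr hb
      have hmrg : pvMergeCell d c0
          = if (!(d.contains c0.1) || pvIsBlank (d.getD c0.1 "")) = true then d.insert c0.1 c0.2 else d := by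
        unfold pvMergeCell; rw [if_neg (by rw [hs', hb']; simp)]
      by_cases hc : d.contains c0.1 = true
      · -- existing column: _combine's second loop skips it
        have e2 : pvNewCell (PySem.Dict.mk (d.items.map (pvRvPair (c0 :: cs)))) c0
            = PySem.Dict.mk (d.items.map (pvRvPair (c0 :: cs))) := by
          unfold pvNewCell; rw [if_neg (by rw [hcont, hc]; simp)]
        rw [e2]
        by_cases hbk : pvIsBlank (d.getD c0.1 "") = true
        · -- base value blank: _merge_rows overwrites, the columnwise value resolves to c0.2
          rw [hmrg, if_pos (by rw [hbk, Bool.or_true])]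
          apply PySem.Dict.ext
          rw [PySem.Dict.items_insert_of_contains _ _ hc]
          simp only [List.map_map]
          apply List.map_congr_left
          intro c hcmem
          simp only [Function.comp_apply]
          by_cases he : (c.1 == c0.1) = true
          · have hk : c.1 = c0.1 := eq_of_beq he
            have hcd : d.getD c.1 "" = c.2 :=
              PySem.Dict.getD_of_mem_items d (Prod.mk.eta ▸ hcmem) hnd ""
            have hbc : pvIsBlank c.2 = true := by rw [← hcd, hk]; exact hbk
            have hsc : PySem.Str.startswith c.1 "_" = false := by rw [hk]; exact hs'
            rw [if_pos he]
            unfold pvRvPair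
            rw [hbc, hsc]
            simp only [Bool.not_false, Bool.and_true]
            rw [if_pos trivial]
            simp only [pvResolveCells]
            rw [show (c0.1 == c.1 && !pvIsBlank c0.2) = true from by
              rw [beq_iff_eq.mpr hk.symm, hb']; rfl]
            simp [hk, hb']
          · rw [if_neg (by simpa using he)]
            apply pvRvPair_cons_skip
            intro _
            by_cases h0 : (c0.1 == c.1) = true
            · exact absurd (beq_iff_eq.mpr (eq_of_beq h0).symm) (by simpa using he)
            · simp [h0]
        · -- base value not blank: both sides keep the base entry
          have hbk' : pvIsBlank (d.getD c0.1 "") = false := Bool.eq_false_iff.mpr hbk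
          rw [hmrg, if_neg (by rw [hbk', hc]; simp)]
          apply PySem.Dict.ext
          apply List.map_congr_left
          intro c hcmem
          apply pvRvPair_cons_skip
          intro hcond
          by_cases he : (c0.1 == c.1) = true
          · have hk : c.1 = c0.1 := (eq_of_beq he).symm
            have hcd : d.getD c.1 "" = c.2 :=
              PySem.Dict.getD_of_mem_items d (Prod.mk.eta ▸ hcmem) hnd ""
            rw [Bool.and_eq_true] at hcond
            have : pvIsBlank (d.getD c0.1 "") = true := by rw [← hk, hcd]; exact hcond.1
            rw [this] at hbk'
            exact absurd hbk' (by simp)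
          · simp [he]
      · -- new column: both sides append it
        have hcfalse : d.contains c0.1 = false := Bool.eq_false_iff.mpr hc
        have e2 : pvNewCell (PySem.Dict.mk (d.items.map (pvRvPair (c0 :: cs)))) c0
            = (PySem.Dict.mk (d.items.map (pvRvPair (c0 :: cs)))).insert c0.1 c0.2 := by
          unfold pvNewCell; rw [if_pos (by rw [hcont, hcfalse, hs', hb']; rfl)]
        rw [e2, hmrg, if_pos (by rw [hcfalse]; simp)]
        have hknot : ∀ c ∈ d.items, (c.1 == c0.1) = false := by
          intro c hcmem
          have := hcfalse
          unfold PySem.Dict.contains at this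
          rw [List.any_eq_false] at this
          simpa using this c hcmem
        apply PySem.Dict.ext
        rw [PySem.Dict.items_insert_of_not_contains _ _ (by rw [hcont]; exact hcfalse),
          PySem.Dict.items_insert_of_not_contains _ _ hcfalse]
        simp only [List.map_append, List.map_cons, List.map_nil]
        have h1 : List.map (pvRvPair (c0 :: cs)) d.items = List.map (pvRvPair cs) d.items := by
          apply List.map_congr_left
          intro c hcmem
          apply pvRvPair_cons_skip
          intro _
          have h2 : (c0.1 == c.1) = false := by
            by_cases h0 : (c0.1 == c.1) = true
            · exact absurd (beq_iff_eq.mpr (eq_of_beq h0).symm) (Bool.eq_false_iff.mp (hknot c hcmem))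
            · simpa using h0
          rw [h2]; rfl
        have h3 : pvRvPair cs (c0.1, c0.2) = (c0.1, c0.2) := by
          unfold pvRvPair
          rw [show pvIsBlank (c0.1, c0.2).2 = false from hb']
          simp
        rw [h1, h3]

theorem pvCombine_fold (cells : List (String × String)) (d : PySem.Dict String String)
    (hnd : d.keys.Nodup) :
    cells.foldl pvNewCell (PySem.Dict.mk (d.items.map (pvRvPair cells))) = cells.foldl pvMergeCell d := by
  induction cells generalizing d with
  | nil =>
    simp only [List.foldl_nil]
    have : d.items.map (pvRvPair []) = d.items := by
      have : ∀ c ∈ d.items, pvRvPair [] c = c := by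
        intro c _
        unfold pvRvPair pvResolveCells
        split <;> simp
      rw [List.map_congr_left this]
      simp
    rw [this]
  | cons c0 cs ih =>
    simp only [List.foldl_cons]
    rw [pvNewCell_star c0 cs d hnd]
    exact ih (pvMergeCell d c0) (nodup_keys_pvMergeCell d c0 hnd)

-- _merge_rows chained at the Dict level
theorem pvMergeRows_chain (rows : List (List (String × String))) (d : PySem.Dict String String) :
    rows.foldl pvMergeRows d.items = (rows.foldl (fun d r => r.foldl pvMergeCell d) d).items := by
  induction rows generalizing d with
  | nil => rfl
  | cons r rs ih =>
    simp only [List.foldl_cons]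
    rw [show pvMergeRows d.items r = (r.foldl pvMergeCell d).items from rfl]
    exact ih _

theorem pvCombine_eq_specReduce (grp : List (List (String × String)))
    (h : ∀ r ∈ grp, (r.map Prod.fst).Nodup) : pvCombine grp = specReduce grp := by
  cases grp with
  | nil => rfl
  | cons first rest =>
    have hfst : (first.map Prod.fst).Nodup := h first (by simp)
    unfold pvCombine specReduce
    simp only [List.headD_cons, List.drop_succ_cons, List.drop_zero]
    have hitems : (first.foldl (fun d c => d.insert c.1 (pvCombineVal rest c)) PySem.Dict.empty).items
        = first.map (pvRvPair rest.flatten) := by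
      rw [PySem.Dict.items_foldl_insert_fresh first Prod.fst (fun c => pvCombineVal rest c)
        PySem.Dict.empty (by intro a _; simp [PySem.Dict.contains, PySem.Dict.empty]) hfst]
      simp only [PySem.Dict.empty, List.nil_append]
      apply List.map_congr_left
      intro c _
      unfold pvCombineVal pvRvPair
      rw [pvResolveRows_eq_flatten]
    have hfold : rest.foldl (fun d r => r.foldl pvNewCell d)
          (first.foldl (fun d c => d.insert c.1 (pvCombineVal rest c)) PySem.Dict.empty)
        = rest.flatten.foldl pvNewCell (PySem.Dict.mk (first.map (pvRvPair rest.flatten))) := by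
      rw [← List.foldl_flatten]
      congr 1
      apply PySem.Dict.ext
      exact hitems
    rw [hfold]
    have hmk : (PySem.Dict.mk first).items = first := rfl
    have hnd : (PySem.Dict.mk first).keys.Nodup := by
      simpa [PySem.Dict.keys, hmk] using hfst
    have := pvCombine_fold rest.flatten (PySem.Dict.mk first) hnd
    rw [hmk] at this
    rw [this]
    rw [show (first : List (String × String)) = (PySem.Dict.mk first).items from rfl,
      pvMergeRows_chain, ← List.foldl_flatten]

-- == SECTION 2: A's single pass computes the tag/dedup/group decomposition ==

def pvGroupF (xs : List (List (String × String))) (t : String × String) : List (List (String × String)) :=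
  xs.filter (fun r => pvTag r == t)

def specOrd (xs : List (List (String × String))) : List (String × String) :=
  PySem.Set.ofList (xs.map pvTag)

def specKeyed (xs : List (List (String × String))) : List (String × List (String × String)) :=
  ((specOrd xs).filter (fun t => t.1 == "key")).map (fun t => (t.2, specReduce (pvGroupF xs t)))

def specHashTags (xs : List (List (String × String))) : List (String × String) :=
  (specOrd xs).filter (fun t => t.1 == "hash")

-- membership shape facts for the two tag namespaces
theorem specKeyed_any_iff (xs : List (List (String × String))) (k : String) :
    (specKeyed xs).any (fun p => p.1 == k) = true ↔ ("key", k) ∈ xs.map pvTag := by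
  unfold specKeyed
  constructor
  · intro hany
    obtain ⟨p, hpm, hpk⟩ := List.any_eq_true.mp hany
    obtain ⟨t, htf, hpt⟩ := List.mem_map.mp hpm
    obtain ⟨htm, htp⟩ := List.mem_filter.mp htf
    have h1 : t.1 = "key" := eq_of_beq htp
    have h2 : t.2 = k := by
      rw [← hpt] at hpk
      exact eq_of_beq hpk
    have : ("key", k) = t := by
      conv_rhs => rw [← Prod.mk.eta (p := t)]
      rw [h1, h2]
    rw [this]
    exact (PySem.Set.mem_ofList _ _).mp htm
  · intro hm
    refine List.any_eq_true.mpr ⟨(k, specReduce (pvGroupF xs ("key", k))),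
      List.mem_map.mpr ⟨("key", k), List.mem_filter.mpr ⟨(PySem.Set.mem_ofList _ _).mpr hm, by simp⟩, rfl⟩, by simp⟩

theorem specHash_mem_iff (xs : List (List (String × String))) (h : String) :
    h ∈ (specHashTags xs).map (·.2) ↔ ("hash", h) ∈ xs.map pvTag := by
  unfold specHashTags
  constructor
  · intro hm
    obtain ⟨t, htf, hsnd⟩ := List.mem_map.mp hm
    obtain ⟨htm, hp⟩ := List.mem_filter.mp htf
    have h1 : t.1 = "hash" := eq_of_beq (by simpa using hp)
    have : ("hash", h) = t := by
      conv_rhs => rw [← Prod.mk.eta (p := t)]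
      rw [h1, hsnd]
    rw [this]
    exact (PySem.Set.mem_ofList _ _).mp htm
  · intro hm
    exact List.mem_map.mpr ⟨("hash", h), List.mem_filter.mpr ⟨(PySem.Set.mem_ofList _ _).mpr hm, by simp⟩, rfl⟩

-- the first matching entry of specKeyed carries the reduced group
theorem specKeyed_find? (xs : List (List (String × String))) (k : String)
    (hmem : ("key", k) ∈ xs.map pvTag) :
    (specKeyed xs).find? (fun p => p.1 == k) = some (k, specReduce (pvGroupF xs ("key", k))) := by
  unfold specKeyed
  have hmem' : ("key", k) ∈ (specOrd xs).filter (fun t => t.1 == "key") :=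
    List.mem_filter.mpr ⟨(PySem.Set.mem_ofList _ _).mpr hmem, by simp⟩
  have hall : ∀ t ∈ (specOrd xs).filter (fun t => t.1 == "key"), t.1 = "key" := by
    intro t ht
    exact eq_of_beq (List.mem_filter.mp ht).2
  generalize hL : (specOrd xs).filter (fun t => t.1 == "key") = L at hmem' hall
  clear hL
  induction L with
  | nil => simp at hmem'
  | cons t L ih =>
    by_cases ht : (t.2 == k) = true
    · have h1 : t.1 = "key" := hall t (by simp)
      have h2 : t.2 = k := eq_of_beq ht
      have hteq : t = ("key", k) := by
        conv_lhs => rw [← Prod.mk.eta (p := t)]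
        rw [h1, h2]
      simp only [List.map_cons, List.find?_cons, hteq]
      simp
    · have htne : t ≠ ("key", k) := by
        intro hcon
        rw [hcon] at ht
        simp at ht
      have hmem'' : ("key", k) ∈ L := by
        rcases List.mem_cons.mp hmem' with h | h
        · exact absurd h.symm htne
        · exact h
      simp only [List.map_cons, List.find?_cons, ht]
      exact ih hmem'' (fun u hu => hall u (List.mem_cons_of_mem _ hu))

-- group bookkeeping under appending one row
theorem pvGroupF_append (xs : List (List (String × String))) (row : List (String × String)) (t : String × String) :
    pvGroupF (xs ++ [row]) t = pvGroupF xs t ++ (if pvTag row == t then [row] else []) := by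
  unfold pvGroupF
  rw [List.filter_append]
  congr 1
  by_cases h : (pvTag row == t) = true <;> simp [h]

theorem pvGroupF_ne_nil (xs : List (List (String × String))) (t : String × String)
    (hmem : t ∈ xs.map pvTag) : pvGroupF xs t ≠ [] := by
  obtain ⟨r, hr, ht⟩ := List.mem_map.mp hmem
  intro hnil
  have : r ∈ pvGroupF xs t := by
    unfold pvGroupF
    rw [List.mem_filter]
    exact ⟨hr, by simp [ht]⟩
  rw [hnil] at this
  simp at this

theorem pvGroupF_nil_of_not_mem (xs : List (List (String × String))) (t : String × String)
    (hmem : t ∉ xs.map pvTag) : pvGroupF xs t = [] := by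
  unfold pvGroupF
  rw [List.filter_eq_nil_iff]
  intro r hr hcon
  exact hmem (by rw [← eq_of_beq hcon]; exact List.mem_map_of_mem hr)

theorem specReduce_append (grp : List (List (String × String))) (row : List (String × String))
    (h : grp ≠ []) : specReduce (grp ++ [row]) = pvMergeRows (specReduce grp) row := by
  cases grp with
  | nil => exact absurd rfl h
  | cons a l => simp [specReduce, List.foldl_append]

theorem headD_append_of_ne_nil (grp : List (List (String × String))) (row x : List (String × String))
    (h : grp ≠ []) : (grp ++ [row]).headD x = grp.headD x := by
  cases grp with
  | nil => exact absurd rfl h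
  | cons a l => rfl

-- specOrd under appending one row
theorem specOrd_append (xs : List (List (String × String))) (row : List (String × String)) :
    specOrd (xs ++ [row]) =
      if pvTag row ∈ xs.map pvTag then specOrd xs else specOrd xs ++ [pvTag row] := by
  unfold specOrd
  rw [List.map_append, List.map_cons, List.map_nil, PySem.Set.ofList_append_singleton,
    PySem.Set.add_eq_ite]
  by_cases h : pvTag row ∈ xs.map pvTag
  · rw [if_pos ((PySem.Set.mem_ofList _ _).mpr h), if_pos h]
  · rw [if_neg (fun hc => h ((PySem.Set.mem_ofList _ _).mp hc)), if_neg h]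

theorem dedupA_invariant (xs : List (List (String × String))) :
    (xs.foldl dedupStepA (PySem.Dict.empty, PySem.Set.empty, [])).1.items = specKeyed xs ∧
    (xs.foldl dedupStepA (PySem.Dict.empty, PySem.Set.empty, [])).2.1 = (specHashTags xs).map (·.2) ∧
    (xs.foldl dedupStepA (PySem.Dict.empty, PySem.Set.empty, [])).2.2 =
      (specHashTags xs).map (fun t => (pvGroupF xs t).headD []) := by
  induction xs using List.reverseRecOn with
  | nil => exact ⟨rfl, rfl, rfl⟩
  | append_singleton xs row ih =>
    obtain ⟨ih1, ih2, ih3⟩ := ih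
    rw [List.foldl_append, List.foldl_cons, List.foldl_nil, dedupStepA_eq, pvRowKey_truthy]
    cases hkey : pvRowKey row with
    | some k =>
      have ht0 : pvTag row = ("key", k) := (pvTag_key_iff row k).mpr hkey
      have hOrd := specOrd_append xs row
      rw [ht0] at hOrd
      simp only [Option.isSome_some, if_pos, Option.getD_some]
      by_cases hmem : ("key", k) ∈ xs.map pvTag
      · -- seen key: merge into the existing entry
        have hcont : (xs.foldl dedupStepA (PySem.Dict.empty, PySem.Set.empty, [])).1.contains k = true := by
          unfold PySem.Dict.contains
          rw [ih1]
          exact (specKeyed_any_iff xs k).mpr hmem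
        rw [if_pos hcont]
        have hOrd' : specOrd (xs ++ [row]) = specOrd xs := by rw [hOrd, if_pos hmem]
        have hgetD : (xs.foldl dedupStepA (PySem.Dict.empty, PySem.Set.empty, [])).1.getD k []
            = specReduce (pvGroupF xs ("key", k)) := by
          unfold PySem.Dict.getD PySem.Dict.get?
          rw [ih1, specKeyed_find? xs k hmem]
          rfl
        refine ⟨?_, ?_, ?_⟩
        · dsimp only
          rw [PySem.Dict.items_insert_of_contains _ _ hcont, ih1, hgetD]
          unfold specKeyed
          rw [hOrd', List.map_map]
          apply List.map_congr_left
          intro t htf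
          obtain ⟨htm, htp⟩ := List.mem_filter.mp htf
          simp only [Function.comp_apply]
          by_cases he : (t.2 == k) = true
          · have hteq : t = ("key", k) := by
              conv_lhs => rw [← Prod.mk.eta (p := t)]
              rw [eq_of_beq htp, eq_of_beq he]
            rw [if_pos he, pvGroupF_append, ht0, hteq]
            rw [show ((("key", k) : String × String) == ("key", k)) = true from by simp, if_pos rfl]
            rw [specReduce_append _ _ (pvGroupF_ne_nil xs _ hmem)]
          · rw [if_neg (by simpa using he)]
            have hne : (pvTag row == t) = false := by
              rw [ht0]
              by_cases hc : ((("key", k) : String × String) == t) = true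
              · exact absurd (congrArg Prod.snd (eq_of_beq hc)).symm (by simpa using he)
              · simpa using hc
            rw [pvGroupF_append, hne]
            simp
        · dsimp only
          rw [ih2]
          unfold specHashTags
          rw [hOrd']
        · dsimp only
          rw [ih3]
          unfold specHashTags
          rw [hOrd']
          apply List.map_congr_left
          intro t htf
          obtain ⟨htm, htp⟩ := List.mem_filter.mp htf
          have hne : (pvTag row == t) = false := by
            rw [ht0]
            by_cases hc : ((("key", k) : String × String) == t) = true
            · have := congrArg Prod.fst (eq_of_beq hc)
              rw [← this] at htp
              simp at htp
            · simpa using hc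
          rw [pvGroupF_append, hne]
          simp
      · -- new key: append a fresh entry
        have hcont : (xs.foldl dedupStepA (PySem.Dict.empty, PySem.Set.empty, [])).1.contains k = false := by
          unfold PySem.Dict.contains
          rw [ih1]
          rcases Bool.eq_false_or_eq_true ((specKeyed xs).any (fun p => p.1 == k)) with h | h
          · exact absurd ((specKeyed_any_iff xs k).mp h) hmem
          · exact h
        rw [if_neg (fun hcon => by rw [hcont] at hcon; exact Bool.false_ne_true hcon)]
        have hOrd' : specOrd (xs ++ [row]) = specOrd xs ++ [("key", k)] := by rw [hOrd, if_neg hmem]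
        have hgroups : ∀ t ∈ specOrd xs, pvGroupF (xs ++ [row]) t = pvGroupF xs t := by
          intro t htm
          have htx : t ∈ xs.map pvTag := (PySem.Set.mem_ofList _ _).mp htm
          have hne : (pvTag row == t) = false := by
            rw [ht0]
            by_cases hc : ((("key", k) : String × String) == t) = true
            · rw [← eq_of_beq hc] at htx
              exact absurd htx hmem
            · simpa using hc
          rw [pvGroupF_append, hne]
          simp
        refine ⟨?_, ?_, ?_⟩
        · dsimp only
          rw [PySem.Dict.items_insert_of_not_contains _ _ hcont, ih1]
          unfold specKeyed
          rw [hOrd', List.filter_append, List.map_append]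
          congr 1
          · apply List.map_congr_left
            intro t htf
            rw [hgroups t (List.mem_filter.mp htf).1]
          · rw [show List.filter (fun t => t.1 == "key") [(("key", k) : String × String)]
                = [("key", k)] from by simp]
            rw [List.map_cons, List.map_nil]
            have : pvGroupF (xs ++ [row]) ("key", k) = [row] := by
              rw [pvGroupF_append, pvGroupF_nil_of_not_mem xs _ hmem, ht0]
              simp
            rw [this]
            rfl
        · dsimp only
          rw [ih2]
          unfold specHashTags
          rw [hOrd', List.filter_append]
          rw [show List.filter (fun t => t.1 == "hash") [(("key", k) : String × String)]
              = [] from by simp]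
          simp
        · dsimp only
          rw [ih3]
          unfold specHashTags
          rw [hOrd', List.filter_append]
          rw [show List.filter (fun t => t.1 == "hash") [(("key", k) : String × String)]
              = [] from by simp]
          rw [List.append_nil]
          apply List.map_congr_left
          intro t htf
          rw [hgroups t (List.mem_filter.mp htf).1]
    | none =>
      have ht0 : pvTag row = ("hash", pvRowHash row) := by
        unfold pvTag
        rw [hkey]
      have hOrd := specOrd_append xs row
      rw [ht0] at hOrd
      simp only [Option.isSome_none, Bool.false_eq_true, if_false]
      by_cases hmem : ("hash", pvRowHash row) ∈ xs.map pvTag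
      · -- seen hash: drop the row
        have hcont : PySem.Set.contains (xs.foldl dedupStepA (PySem.Dict.empty, PySem.Set.empty, [])).2.1 (pvRowHash row) = true := by
          rw [ih2]
          exact (PySem.Set.contains_iff _ _).mpr ((specHash_mem_iff xs (pvRowHash row)).mpr hmem)
        rw [if_pos hcont]
        have hOrd' : specOrd (xs ++ [row]) = specOrd xs := by rw [hOrd, if_pos hmem]
        have hgroups : ∀ t ∈ specOrd xs, t.1 = "hash" →
            (pvGroupF (xs ++ [row]) t).headD [] = (pvGroupF xs t).headD [] := by
          intro t htm ht1
          by_cases he : (pvTag row == t) = true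
          · rw [pvGroupF_append, he]
            exact headD_append_of_ne_nil _ _ _
              (pvGroupF_ne_nil xs t ((PySem.Set.mem_ofList _ _).mp htm))
          · rw [pvGroupF_append, Bool.eq_false_iff.mpr he]
            simp
        refine ⟨?_, ?_, ?_⟩
        · dsimp only
          rw [ih1]
          unfold specKeyed
          rw [hOrd']
          apply List.map_congr_left
          intro t htf
          obtain ⟨htm, htp⟩ := List.mem_filter.mp htf
          have hne : (pvTag row == t) = false := by
            rw [ht0]
            by_cases hc : ((("hash", pvRowHash row) : String × String) == t) = true
            · have := congrArg Prod.fst (eq_of_beq hc)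
              rw [← this] at htp
              simp at htp
            · simpa using hc
          rw [pvGroupF_append, hne]
          simp
        · dsimp only
          rw [ih2]
          unfold specHashTags
          rw [hOrd']
        · dsimp only
          rw [ih3]
          unfold specHashTags
          rw [hOrd']
          apply List.map_congr_left
          intro t htf
          obtain ⟨htm, htp⟩ := List.mem_filter.mp htf
          exact (hgroups t htm (eq_of_beq htp)).symm
      · -- fresh hash: record it and keep the row
        have hcont : PySem.Set.contains (xs.foldl dedupStepA (PySem.Dict.empty, PySem.Set.empty, [])).2.1 (pvRowHash row) = false := by
          rw [ih2]
          rcases Bool.eq_false_or_eq_true (PySem.Set.contains ((specHashTags xs).map (·.2)) (pvRowHash row)) with h | h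
          · exact absurd ((specHash_mem_iff xs (pvRowHash row)).mp ((PySem.Set.contains_iff _ _).mp h)) hmem
          · exact h
        rw [if_neg (fun hcon => by rw [hcont] at hcon; exact Bool.false_ne_true hcon)]
        have hOrd' : specOrd (xs ++ [row]) = specOrd xs ++ [("hash", pvRowHash row)] := by
          rw [hOrd, if_neg hmem]
        have hgroups : ∀ t ∈ specOrd xs, pvGroupF (xs ++ [row]) t = pvGroupF xs t := by
          intro t htm
          have htx : t ∈ xs.map pvTag := (PySem.Set.mem_ofList _ _).mp htm
          have hne : (pvTag row == t) = false := by
            rw [ht0]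
            by_cases hc : ((("hash", pvRowHash row) : String × String) == t) = true
            · rw [← eq_of_beq hc] at htx
              exact absurd htx hmem
            · simpa using hc
          rw [pvGroupF_append, hne]
          simp
        have hadd : PySem.Set.add (xs.foldl dedupStepA (PySem.Dict.empty, PySem.Set.empty, [])).2.1 (pvRowHash row)
            = (xs.foldl dedupStepA (PySem.Dict.empty, PySem.Set.empty, [])).2.1 ++ [pvRowHash row] := by
          unfold PySem.Set.add
          rw [hcont]
          simp
        refine ⟨?_, ?_, ?_⟩
        · dsimp only
          rw [ih1]
          unfold specKeyed
          rw [hOrd', List.filter_append]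
          rw [show List.filter (fun t => t.1 == "key") [(("hash", pvRowHash row) : String × String)]
              = [] from by simp]
          rw [List.append_nil]
          apply List.map_congr_left
          intro t htf
          rw [hgroups t (List.mem_filter.mp htf).1]
        · dsimp only
          rw [hadd, ih2]
          unfold specHashTags
          rw [hOrd', List.filter_append]
          rw [show List.filter (fun t => t.1 == "hash") [(("hash", pvRowHash row) : String × String)]
              = [("hash", pvRowHash row)] from by simp]
          simp
        · dsimp only
          rw [ih3]
          unfold specHashTags
          rw [hOrd', List.filter_append]
          rw [show List.filter (fun t => t.1 == "hash") [(("hash", pvRowHash row) : String × String)]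
              = [("hash", pvRowHash row)] from by simp]
          rw [List.map_append]
          congr 1
          · apply List.map_congr_left
            intro t htf
            rw [hgroups t (List.mem_filter.mp htf).1]
          · have : pvGroupF (xs ++ [row]) ("hash", pvRowHash row) = [row] := by
              rw [pvGroupF_append, pvGroupF_nil_of_not_mem xs _ hmem, ht0]
              simp
            rw [List.map_cons, List.map_nil, this]
            rfl

-- == SECTION 3: B's port computes the same decomposition ==

theorem pvGroup_eq (xs : List (List (String × String))) (t : String × String) :
    pvGroup xs (xs.map pvTag) t = pvGroupF xs t := by
  unfold pvGroup pvGroupF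
  induction xs with
  | nil => rfl
  | cons x xs ih =>
    simp only [List.map_cons, List.zip_cons_cons, List.filterMap_cons, List.filter_cons]
    by_cases hx : pvTag x == t
    · simp only [hx]
      rw [ih]
      simp
    · simp only [hx]
      rw [ih]
      simp

-- ===== VERDICT (by name: the statement is the Claim_ definition above) =====
theorem deduplicate_per_vehicle_rows_py_spec : Claim_equal_deduplicate_per_vehicle_rows_py := by
  intro merged column_headers _ hpre
  unfold Spec_deduplicate_per_vehicle_rows_py
  unfold deduplicate_per_vehicle_rows_py deduplicate_per_vehicle_rows_py_alt
  by_cases hnil : (PySem.Dict.mk merged).getD "per_vehicle_rows" [] = []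
  · simp only [hnil, ite_true]
  · simp only [hnil, ite_false]
    obtain ⟨i1, i2, i3⟩ := dedupA_invariant ((PySem.Dict.mk merged).getD "per_vehicle_rows" [])
    have hrows : ∀ r ∈ (PySem.Dict.mk merged).getD "per_vehicle_rows" [], (r.map Prod.fst).Nodup := by
      intro r hr
      cases hget : (PySem.Dict.mk merged).get? "per_vehicle_rows" with
      | none =>
        rw [PySem.Dict.getD_eq_get?_getD, hget] at hr
        simp at hr
      | some l =>
        have hmem : ("per_vehicle_rows", l) ∈ (PySem.Dict.mk merged).items :=
          PySem.Dict.mem_items_of_get?_eq_some _ hget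
        have hl : (PySem.Dict.mk merged).getD "per_vehicle_rows" [] = l := by
          rw [PySem.Dict.getD_eq_get?_getD, hget]
          rfl
        rw [hl] at hr
        exact hpre ("per_vehicle_rows", l) hmem r hr
    congr 1
    rw [PySem.List.foldl_append_if, PySem.List.foldl_append_if, List.nil_append]
    unfold PySem.Dict.values
    rw [i1, i3]
    rw [show List.filter (fun t => t.1 == "hash")
          (PySem.List.dedup (List.map pvTag ((PySem.Dict.mk merged).getD "per_vehicle_rows" [])))
        = specHashTags ((PySem.Dict.mk merged).getD "per_vehicle_rows" []) from rfl,
      show List.filter (fun t => t.1 == "key")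
          (PySem.List.dedup (List.map pvTag ((PySem.Dict.mk merged).getD "per_vehicle_rows" [])))
        = (specOrd ((PySem.Dict.mk merged).getD "per_vehicle_rows" [])).filter (fun t => t.1 == "key") from rfl]
    refine congrArg ((PySem.Dict.mk merged).insert "per_vehicle_rows") ?_
    refine congrArg₂ (fun (a b : List (List (String × String))) => a ++ b) ?_ ?_
    · -- hash-deduplicated rows
      apply List.map_congr_left
      intro t _
      rw [pvGroup_eq]
    · -- keyed rows
      unfold specKeyed
      rw [List.map_map]
      apply List.map_congr_left
      intro t htf
      simp only [Function.comp_apply]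
      rw [pvGroup_eq]
      exact (pvCombine_eq_specReduce _ (fun r hr => hrows r (List.mem_filter.mp hr).1)).symm
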